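-- pv_equiv track=rewrite | github.com/moomoo-hub/trend-bot-kr | src/writer.py | _reduce_keyword_repeat
-- ===== SOURCE A (Python) =====
-- def _reduce_keyword_repeat(text: str, keyword: str, max_repeat: int = 2) -> str:
--     """키워드 반복 줄이기 (최대 2회)"""
--     count = text.count(keyword)
--
--     if count > max_repeat:
--         # 뒤에서부터 제거
--         words = text.split()
--         removed = 0
--         for i in range(len(words) - 1, -1, -1):
--             if removed >= (count - max_repeat):
--                 break
--             if keyword in words[i]:
--                 words[i] = ""
--                 removed += 1
--
--         text = " ".join(filter(None, words))
--
--     return text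
-- ===== SOURCE B (Python) =====
-- def _reduce_keyword_repeat(text: str, keyword: str, max_repeat: int = 2) -> str:
--     """키워드 반복 줄이기 (최대 2회)"""
--     count = text.count(keyword)
--     if count <= max_repeat:
--         return text
--     words = text.split()
--     matches = sum(1 for w in words if keyword in w)
--     keep = matches - (count - max_repeat)
--     out = []
--     seen = 0
--     for w in words:
--         if keyword in w:
--             if seen < keep:
--                 out.append(w)
--             seen += 1
--         else:
--             out.append(w)
--     return " ".join(out)
-- ===== Notes on version B (the rewrite author's own statement) =====
-- stated objective: simpler
-- what changed: Replaces A's backward index loop that mutates the word list (blanking the last matches and re-filtering empties) with a single forward pass that counts matched words once and keeps only the first matches-need of them.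
import Mathlib
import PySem

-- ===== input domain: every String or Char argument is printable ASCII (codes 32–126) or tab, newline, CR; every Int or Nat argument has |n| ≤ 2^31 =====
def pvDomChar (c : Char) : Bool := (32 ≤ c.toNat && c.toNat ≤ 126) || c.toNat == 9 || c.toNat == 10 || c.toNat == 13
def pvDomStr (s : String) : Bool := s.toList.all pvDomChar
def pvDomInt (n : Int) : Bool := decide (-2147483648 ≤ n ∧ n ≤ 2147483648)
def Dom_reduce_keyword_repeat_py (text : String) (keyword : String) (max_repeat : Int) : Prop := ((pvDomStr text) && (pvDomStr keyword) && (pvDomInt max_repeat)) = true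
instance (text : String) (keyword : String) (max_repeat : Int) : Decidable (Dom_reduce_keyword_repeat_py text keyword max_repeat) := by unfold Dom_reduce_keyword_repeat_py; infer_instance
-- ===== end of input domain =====

-- B replaces A's backward mutate-and-refilter loop with a one-pass forward keep-the-first-matches scan (simpler, same cost).


-- ===== PORT A =====
-- count = text.count(keyword); if count > max_repeat: words = text.split(); backward index
-- loop blanking matched words until (count - max_repeat) are removed (Python's break is
-- modelled by the guard 'removed ≥ need → state unchanged', equivalent since nothing
-- follows the break); " ".join(filter(None, words)).
def reduce_keyword_repeat_py (text : String) (keyword : String) (max_repeat : Int) : String :=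
  let count := PySem.Str.count text keyword
  if (count : Int) > max_repeat then
    let words := PySem.Str.split₀ text
    let res := (PySem.List.pyRange ((words.length : Int) - 1) (-1) (-1)).foldl
      (fun (s : List String × Int) i =>
        if s.2 ≥ (count : Int) - max_repeat then s
        else if PySem.Str.isIn keyword (PySem.List.pyGetD s.1 i "") then
          (s.1.set i.toNat "", s.2 + 1)
        else s)
      (words, 0)
    PySem.Str.join " " (res.1.filter (fun w => w ≠ ""))
  else text

-- ===== PORT B =====
-- early return when count <= max_repeat; matches = sum(1 for w in words if keyword in w);
-- keep = matches - (count - max_repeat); one forward pass keeping the first `keep` matched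
-- words and every unmatched word; " ".join(out).
def reduce_keyword_repeat_py_alt (text : String) (keyword : String) (max_repeat : Int) : String :=
  let count := PySem.Str.count text keyword
  if (count : Int) ≤ max_repeat then text
  else
    let words := PySem.Str.split₀ text
    let matchCount : Int := (words.countP (fun w => PySem.Str.isIn keyword w) : Int)
    let keep := matchCount - ((count : Int) - max_repeat)
    let res := words.foldl
      (fun (s : List String × Int) w =>
        if PySem.Str.isIn keyword w then
          if s.2 < keep then (s.1 ++ [w], s.2 + 1) else (s.1, s.2 + 1)
        else (s.1 ++ [w], s.2))
      ([], 0)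
    PySem.Str.join " " res.1

-- ===== PRECONDITION & SPEC =====
def Spec_reduce_keyword_repeat_py (text : String) (keyword : String) (max_repeat : Int) (out : String) : Prop := out = reduce_keyword_repeat_py_alt text keyword max_repeat
instance (text : String) (keyword : String) (max_repeat : Int) (out : String) : Decidable (Spec_reduce_keyword_repeat_py text keyword max_repeat out) := by unfold Spec_reduce_keyword_repeat_py; infer_instance

-- ===== CLAIM (what is proved, stated in full; the proofs are below) =====
def Claim_equal_reduce_keyword_repeat_py : Prop := ∀ (text : String) (keyword : String) (max_repeat : Int), Dom_reduce_keyword_repeat_py text keyword max_repeat → Spec_reduce_keyword_repeat_py text keyword max_repeat (reduce_keyword_repeat_py text keyword max_repeat)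

-- ===== LEMMAS AND PROOFS =====

-- A's loop, rephrased on the REVERSED word list (head = last word): blank matched words
-- while fewer than `need` have been removed.  (p abstracts the match test 'keyword in w'.)
def procL (p : String → Bool) (need : Int) : List String → Int → List String × Int
  | [], rem => ([], rem)
  | w :: t, rem =>
      if rem ≥ need then (w :: t, rem)
      else if p w then
        ("" :: (procL p need t (rem + 1)).1, (procL p need t (rem + 1)).2)
      else
        (w :: (procL p need t rem).1, (procL p need t rem).2)

-- B's loop without the accumulator: keep matched words while seen < keep.
def keepF (p : String → Bool) (keep : Int) : List String → Int → List String
  | [], _ => []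
  | w :: t, seen =>
      if p w then
        if seen < keep then w :: keepF p keep t (seen + 1) else keepF p keep t (seen + 1)
      else w :: keepF p keep t seen

theorem procL_of_ge (p : String → Bool) (need : Int) (zs : List String) (rem : Int)
    (h : rem ≥ need) : procL p need zs rem = (zs, rem) := by
  cases zs with
  | nil => rfl
  | cons w t => simp [procL, h]

-- shifting the removed-counter into the threshold
theorem procL_shift (p : String → Bool) :
    ∀ (zs : List String) (need rem : Int),
    procL p need zs rem = ((procL p (need - rem) zs 0).1, (procL p (need - rem) zs 0).2 + rem) := by
  intro zs
  induction zs with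
  | nil => intro need rem; simp [procL]
  | cons w t ih =>
    intro need rem
    by_cases hge : rem ≥ need
    · rw [procL_of_ge p need _ rem hge, procL_of_ge p (need - rem) _ 0 (by omega)]
      simp
    · simp only [procL, if_neg (by omega : ¬ rem ≥ need), if_neg (by omega : ¬ (0:Int) ≥ need - rem)]
      by_cases hin : p w
      · rw [if_pos hin, if_pos hin, ih need (rem + 1), ih (need - rem) (0 + 1),
          show need - (rem + 1) = need - rem - (0 + 1) by ring]
        simp
        omega
      · rw [if_neg hin, if_neg hin, ih need rem, ih (need - rem) 0]

-- L1: A's fold over range(len-1, -1, -1) on xs ++ ys is procL on xs.reverse.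
theorem foldl_eq_procL (p : String → Bool) (need : Int) :
    ∀ (xs ys : List String) (rem : Int),
    (PySem.List.pyRange ((xs.length : Int) - 1) (-1) (-1)).foldl
      (fun (s : List String × Int) i =>
        if s.2 ≥ need then s
        else if p (PySem.List.pyGetD s.1 i "") then
          (s.1.set i.toNat "", s.2 + 1)
        else s)
      (xs ++ ys, rem)
    = ((procL p need xs.reverse rem).1.reverse ++ ys, (procL p need xs.reverse rem).2) := by
  intro xs
  induction xs using List.reverseRecOn with
  | nil =>
    intro ys rem
    simp [PySem.List.pyRange_neg_one_eq_nil (by norm_num : (-1:Int) - 1 ≤ -1), procL]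
  | append_singleton xs₀ w ih =>
    intro ys rem
    have hlen : (((xs₀ ++ [w]).length : Int)) - 1 = ((xs₀.length : Int)) := by
      rw [List.length_append]; push_cast; simp
    rw [hlen, PySem.List.pyRange_neg_one_cons (by omega)]
    simp only [List.foldl_cons]
    have hget : PySem.List.pyGetD ((xs₀ ++ [w]) ++ ys) ((xs₀.length : Int)) "" = w := by
      rw [PySem.List.pyGetD_natCast, List.append_assoc]
      simp [List.getD_append_right, List.getD]
    have hrev : (xs₀ ++ [w]).reverse = w :: xs₀.reverse := by simp
    by_cases hge : rem ≥ need
    · rw [if_pos hge]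
      have hh := ih ([w] ++ ys) rem
      rw [show (xs₀ ++ [w]) ++ ys = xs₀ ++ ([w] ++ ys) by rw [List.append_assoc]]
      rw [hh, hrev, procL_of_ge p need _ rem hge, procL_of_ge p need _ rem hge]
      simp
    · rw [if_neg hge, hget]
      by_cases hin : p w
      · rw [if_pos hin]
        have hset : ((xs₀ ++ [w]) ++ ys).set (((xs₀.length : Int)).toNat) "" = xs₀ ++ ([""] ++ ys) := by
          simp [List.set_append]
        rw [hset, ih ([""] ++ ys) (rem + 1), hrev]
        simp only [procL, if_neg hge, if_pos hin]
        simp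
      · rw [if_neg hin]
        rw [show (xs₀ ++ [w]) ++ ys = xs₀ ++ ([w] ++ ys) by rw [List.append_assoc]]
        rw [ih ([w] ++ ys) rem, hrev]
        simp only [procL, if_neg hge, if_neg hin]
        simp

-- B's foldl is keepF with an accumulator in front.
theorem foldl_eq_keepF (p : String → Bool) (keep : Int) :
    ∀ (ws : List String) (out : List String) (seen : Int),
    ws.foldl
      (fun (s : List String × Int) w =>
        if p w then
          if s.2 < keep then (s.1 ++ [w], s.2 + 1) else (s.1, s.2 + 1)
        else (s.1 ++ [w], s.2))
      (out, seen)
    = (out ++ keepF p keep ws seen, seen + ((ws.countP p : Int))) := by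
  intro ws
  induction ws with
  | nil => intro out seen; simp [keepF]
  | cons w t ih =>
    intro out seen
    simp only [List.foldl_cons, keepF]
    by_cases hin : p w
    · rw [if_pos hin, if_pos hin]
      by_cases hlt : seen < keep
      · rw [if_pos hlt, if_pos hlt, ih]
        simp only [Prod.mk.injEq, List.countP_cons, hin, List.append_assoc, List.cons_append,
          List.nil_append, if_true]
        exact ⟨by simp, by push_cast; ring⟩
      · rw [if_neg hlt, if_neg hlt, ih]
        simp only [Prod.mk.injEq, List.countP_cons, hin, if_true]
        exact ⟨by simp, by push_cast; ring⟩
    · rw [if_neg hin, if_neg hin, ih]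
      simp only [Prod.mk.injEq, List.countP_cons, hin, List.append_assoc, List.cons_append,
        List.nil_append, if_false, Bool.false_eq_true]
      exact ⟨by simp, by push_cast; ring⟩

-- keepF keeps everything when all matched words fit under the threshold.
theorem keepF_all (p : String → Bool) (keep : Int) :
    ∀ (ws : List String) (seen : Int),
    seen + ((ws.countP p : Int)) ≤ keep →
    keepF p keep ws seen = ws := by
  intro ws
  induction ws with
  | nil => intro seen _; rfl
  | cons w t ih =>
    intro seen h
    simp only [List.countP_cons] at h
    by_cases hin : p w
    · simp only [keepF, if_pos hin]
      simp only [hin, if_true] at h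
      rw [if_pos (by push_cast at h ⊢; omega)]
      rw [ih (seen + 1) (by push_cast at h ⊢; omega)]
    · simp only [keepF, if_neg hin]
      simp only [hin, if_false, Bool.false_eq_true] at h
      rw [ih seen (by push_cast at h ⊢; omega)]

-- appending one word on the right of keepF.
theorem keepF_append (p : String → Bool) (keep : Int) :
    ∀ (ts : List String) (w : String) (seen : Int),
    keepF p keep (ts ++ [w]) seen =
      keepF p keep ts seen ++
        (if p w then
          (if seen + ((ts.countP p : Int)) < keep then [w] else [])
        else [w]) := by
  intro ts
  induction ts with
  | nil =>
    intro w seen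
    by_cases hin : p w <;> simp [keepF, hin]
  | cons x t ih =>
    intro w seen
    by_cases hx : p x
    · simp only [List.cons_append, keepF, if_pos hx]
      by_cases hlt : seen < keep
      · rw [if_pos hlt, if_pos hlt, ih]
        simp only [List.countP_cons, hx, if_true, List.cons_append]
        have : seen + 1 + ((t.countP p : Int)) = seen + (((t.countP p + 1 : Nat) : Int)) := by
          push_cast; ring
        rw [this]
      · rw [if_neg hlt, if_neg hlt, ih]
        simp only [List.countP_cons, hx, if_true]
        have : seen + 1 + ((t.countP p : Int)) = seen + (((t.countP p + 1 : Nat) : Int)) := by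
          push_cast; ring
        rw [this]
    · simp only [List.cons_append, keepF, if_neg hx]
      rw [ih]
      simp only [List.countP_cons, hx, if_false, Bool.false_eq_true, List.cons_append, Nat.add_zero]

-- MAIN bridge: filtering the blanks out of A's (reversed-list) result equals B's forward keep.
theorem filter_procL_eq_keepF (p : String → Bool) :
    ∀ (ws : List String), (∀ w ∈ ws, w ≠ "") → ∀ (need : Int),
    ((procL p need ws.reverse 0).1.reverse.filter (fun w => w ≠ ""))
      = keepF p (((ws.countP p : Int)) - need) ws 0 := by
  intro ws
  induction ws using List.reverseRecOn with
  | nil => intro _ need; simp [procL, keepF]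
  | append_singleton ts w ih =>
    intro hne need
    have hts : ∀ x ∈ ts, x ≠ "" := fun x hx => hne x (by simp [hx])
    have hw : w ≠ "" := hne w (by simp)
    have hrev : (ts ++ [w]).reverse = w :: ts.reverse := by simp
    rw [hrev]
    by_cases hneed : (0 : Int) ≥ need
    · rw [procL_of_ge p need _ 0 hneed]
      rw [show (w :: ts.reverse).reverse = ts ++ [w] by simp]
      rw [keepF_all p _ (ts ++ [w]) 0 (by omega)]
      rw [List.filter_eq_self.mpr]
      intro x hx
      simp only [List.mem_append, List.mem_singleton] at hx
      rcases hx with hx | hx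
      · simpa using hts x hx
      · rw [hx]; simpa using hw
    · by_cases hin : p w
      · rw [show procL p need (w :: ts.reverse) 0 =
            ("" :: (procL p need ts.reverse 1).1, (procL p need ts.reverse 1).2) by
          simp [procL, hin, if_neg (by omega : ¬ (0:Int) ≥ need)]]
        rw [procL_shift p ts.reverse need 1]
        simp only [List.reverse_cons]
        rw [List.filter_append]
        rw [show need - 1 = need - 1 by rfl]
        have hih := ih hts (need - 1)
        simp only [hih]
        rw [keepF_append]
        simp only [List.countP_append, List.countP_cons, List.countP_nil, hin, if_true,
          Nat.zero_add]
        rw [if_neg (by push_cast; omega)]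
        have hkeep : ((ts.countP p : Int)) - (need - 1) = (((ts.countP p + 1 : Nat) : Int)) - need := by
          push_cast; ring
        rw [hkeep]
        simp
      · rw [show procL p need (w :: ts.reverse) 0 =
            (w :: (procL p need ts.reverse 0).1, (procL p need ts.reverse 0).2) by
          simp [procL, hin, if_neg (by omega : ¬ (0:Int) ≥ need)]]
        simp only [List.reverse_cons]
        rw [List.filter_append]
        have hih := ih hts need
        simp only [hih]
        rw [keepF_append]
        simp only [List.countP_append, List.countP_cons, List.countP_nil, hin, if_false,
          Bool.false_eq_true, Nat.add_zero, Nat.zero_add]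
        simp [hw]

-- words produced by text.split() are never empty
theorem split₀_go_ne_nil :
    ∀ (s cur : List Char) (acc : List (List Char)), (∀ l ∈ acc, l ≠ []) →
    ∀ l ∈ PySem.Chars.split₀.go s cur acc, l ≠ [] := by
  intro s
  induction s with
  | nil =>
    intro cur acc hacc l hl
    simp only [PySem.Chars.split₀.go] at hl
    by_cases hc : cur.isEmpty
    · rw [if_pos hc] at hl
      simp only [List.mem_reverse] at hl
      exact hacc l hl
    · rw [if_neg hc] at hl
      simp only [List.mem_reverse, List.mem_cons] at hl
      rcases hl with hl | hl
      · rw [hl]; simp [List.isEmpty_iff] at hc; simpa using hc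
      · exact hacc l hl
  | cons c rest ih =>
    intro cur acc hacc l hl
    simp only [PySem.Chars.split₀.go] at hl
    by_cases hsp : PySem.Chars.isspace c
    · rw [if_pos hsp] at hl
      by_cases hc : cur.isEmpty
      · rw [if_pos hc] at hl
        exact ih [] acc hacc l hl
      · rw [if_neg hc] at hl
        refine ih [] (cur.reverse :: acc) ?_ l hl
        intro x hx
        simp only [List.mem_cons] at hx
        rcases hx with hx | hx
        · rw [hx]; simp [List.isEmpty_iff] at hc; simpa using hc
        · exact hacc x hx
    · rw [if_neg hsp] at hl
      exact ih (c :: cur) acc hacc l hl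

theorem mem_split₀_ne_empty (text : String) :
    ∀ w ∈ PySem.Str.split₀ text, w ≠ "" := by
  intro w hw
  simp only [PySem.Str.split₀, PySem.Chars.split₀, List.mem_map] at hw
  obtain ⟨l, hl, rfl⟩ := hw
  have hne : l ≠ [] := split₀_go_ne_nil text.toList [] [] (by simp) l hl
  intro h
  apply hne
  have := congrArg String.toList h
  simpa using this

-- ===== VERDICT (by name: the statement is the Claim_ definition above) =====
theorem reduce_keyword_repeat_py_spec : Claim_equal_reduce_keyword_repeat_py := by
  intro text keyword max_repeat _
  unfold Spec_reduce_keyword_repeat_py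
  simp only [reduce_keyword_repeat_py, reduce_keyword_repeat_py_alt]
  by_cases hgt : ((PySem.Str.count text keyword : Int)) > max_repeat
  · rw [if_pos hgt, if_neg (by omega)]
    have hA := foldl_eq_procL (fun w => PySem.Str.isIn keyword w)
      ((PySem.Str.count text keyword : Int) - max_repeat)
      (PySem.Str.split₀ text) [] 0
    rw [List.append_nil] at hA
    rw [hA]
    have hB := foldl_eq_keepF (fun w => PySem.Str.isIn keyword w)
      (((((PySem.Str.split₀ text).countP (fun w => PySem.Str.isIn keyword w)) : Int))
        - ((PySem.Str.count text keyword : Int) - max_repeat))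
      (PySem.Str.split₀ text) [] 0
    rw [hB]
    rw [List.append_nil, List.nil_append]
    congr 1
    exact filter_procL_eq_keepF (fun w => PySem.Str.isIn keyword w)
      (PySem.Str.split₀ text) (mem_split₀_ne_empty text)
      ((PySem.Str.count text keyword : Int) - max_repeat)
  · rw [if_neg hgt, if_pos (by omega)]
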